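/- GENERATED by mk_final_copies.py from the proof of the farm's unit `start_decoder.C14c` (farm:start_decoder.C14c.1: Proof.lean) as the
   re-elaboration sweep compiled it — do not edit. -/
/-
  PROOF of the unit `start_decoder.C14c` (ONE ROUND of loop 3937, 0x115129 … 0x1151ba + the back edge 0x115121 … 0x115125; 36 instructions,
  six check calls, eight SSE instructions): entry `At14L … j` at the loop head, exits `At14L … (j + 1)` (with `j < LV`, `LV` unchanged)
  through `C14.carry14`, or `AtC15` (`jle 0x114dfa`: `LV ≤ j`) through `C14.carry14` + `C14.ok14_of_loop`.
-/
import Asan.CheckWalk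
import Vorbis.Spec.StartDecoderATest
import Vorbis.Spec.StartDecoderCarry
import Vorbis.Spec.Units.start_decoder_C14c

open X86 X86.User Asan Vorbis Vorbis.Spec Vorbis.Spec.StartDecoder

set_option maxRecDepth 100000
set_option maxHeartbeats 4000000

namespace Vorbis.Spec.start_decoder_C14c

/-- **A check site inside the struct `cb(i)`** (`k` bytes at `c + off`, `c = codebooks + 2120·i`): inside the codebooks block
(`CodebooksOK` over the function's block predicate: `SDw.cb0`), which is live (`Env.live`). The four checked fields of the round:
`lookup_values` (`c + 1CH`), `delta_value` (`c + 14H`), `minimum_value` (`c + 10H`), `sequence_p` (`c + 1AH`). -/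
theorem c14c_site {g : Ghost} {i : Nat} {A2 A3 Ai : Arena} {A : Arena × List Obj} {v : State}
    (hc : Cur g i A2 A3 Ai A v) (off k : Nat) (h1 : 1 ≤ k) (h2 : off + k ≤ 2120) :
    Site (Live (stackObjs g.frames' ++ A.2)) (g.cb v.mem i + off) k := by
  rcases (hc.sd.cb0 (by omega)).1 with h0 | hok
  · exact absurd h0 (hc.sd.cb0 (by omega)).2
  · exact hok.site_cb_field hc.sd.env.live i hc.lt off k h2 h1 rfl

/-- 0x11518f `shl rbp, 2` of the counter `j` (after `movsxd rbp, r12d`): the byte offset `4 j`. A rewrite rule for the walker's facts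
list, so that the address of `multiplicands[j]` reads `UInt64.ofNat (4 * j) + UInt64.ofNat MU`. -/
theorem c14c_shl2 (j : Nat) (hj : j < 2 ^ 31) : UInt64.ofNat j <<< 2 = UInt64.ofNat (4 * j) := by
  apply UInt64.toNat_inj.mp
  have e3 : (2 : UInt64).toNat % 64 = 2 := by decide
  have hlt : j < 2 ^ 31 := hj
  rw [UInt64.toNat_shiftLeft, UInt64.toNat_ofNat', UInt64.toNat_ofNat', e3, Nat.shiftLeft_eq]
  omega

/-- **The loop's exit** (0x115136 `jle 0x114dfa` taken): `AtC15` at a state `w` that differs from the loop head's `v` by quiet windows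
only (the pushed return address of the check call), with rsp, r12, r14 unchanged. `C14.carry14` is stated for the loop head's program
counter, so it is applied to `w` with `rip` reset to the loop head (the memory and the registers are `w`'s); `Frame.step` / `Cur.step`
with the empty change then move `Frame` and `Cur` to `w` itself, `C14.ok14_of_loop` gives `CodebookOK`. -/
theorem c14c_exit15 {u₀ : State} {g : Ghost} {i : Nat} {A2 A3 Ai Am : Arena} {A : Arena × List Obj} {mults j : Nat}
    {v w : State} {ws : List Span}
    (h : In14L u₀ g i A2 A3 Ai Am A mults j v)
    (hs : Mem.SameExcept ws v.mem w.mem) (hun : ShadowUntouched v.mem w.mem)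
    (hq : ∀ x, x ∈ ws → C14.QuietWin14 g x)
    (hrip : w.rip = L.start_decoder.cut166) (hrsp : w.reg .rsp = v.reg .rsp) (hcode : CodeOK u₀ w.mem) (hinv : abiInv w)
    (hr14 : w.reg .r14 = v.reg .r14) (hr12 : w.reg .r12 = v.reg .r12) : AtC15 u₀ g i w := by
  -- `w` with the loop head's program counter
  obtain ⟨w', hw'⟩ : ∃ w' : State, w' = { w with rip := L.start_decoder.loop14 } := ⟨_, rfl⟩
  have e_mem : w'.mem = w.mem := by rw [hw']
  have e_reg : ∀ r, w'.reg r = w.reg r := by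
    intro r
    rw [hw']
    rfl
  have e_rip : w'.rip = L.start_decoder.loop14 := by rw [hw']
  have hinv' : abiInv w' := by
    rw [hw']
    exact hinv
  have hs' : Mem.SameExcept ws v.mem w'.mem := by
    rw [e_mem]
    exact hs
  have hun' : ShadowUntouched v.mem w'.mem := by
    rw [e_mem]
    exact hun
  have hcode' : CodeOK u₀ w'.mem := by
    rw [e_mem]
    exact hcode
  obtain ⟨hL, hcb, hlv⟩ := C14.carry14 (j' := j) h hs' hun' (fun x hx => Or.inl (hq x hx)) e_rip
    ((e_reg .rsp).trans hrsp) hcode' hinv' ((e_reg .r14).trans hr14) (((e_reg .r12).trans hr12).trans h.r12) h.j_le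
  -- from `w'` to `w`: nothing changes but `rip`
  have hs0 : Mem.SameExcept [] w'.mem w.mem := by
    rw [e_mem]
    exact Mem.SameExcept.refl _ _
  have hun0 : ShadowUntouched w'.mem w.mem := by
    rw [e_mem]
    exact Mem.EqOn.refl _ _ _
  have hok0 : ∀ x, x ∈ ([] : List Span) → OkWin g Ai A (g.cb w'.mem i) x := by
    intro x hx
    exact absurd hx List.not_mem_nil
  have hb : Bits (g.Blk A) g.len w.mem g.f := by
    rw [← e_mem]
    exact (MInv.of hL.frame hL.cur).sd.bits
  have hF : Frame u₀ g pc_C15 A w := Frame.step hL.frame hL.cur hs0 hun0 hok0 hb hrip (e_reg .rsp).symm hcode hinv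
  obtain ⟨hC, hcb0⟩ := Cur.step hL.frame hL.cur hs0 hun0 hok0 hb (e_reg .r14).symm
  have hok := C14.ok14_of_loop hL
  have hmu := hL.mults
  rw [e_mem] at hok hmu
  exact ⟨A, mults, A2, A3, Ai, { frame := hF, cur := hC, ok := hok, mults := hmu }⟩

/-- **The back edge** (0x115125 → 0x115129 with `j + 1`): `At14L` for `j + 1` at a state `w` that differs from the loop head's `v` by
the pushed return addresses of the check calls, the round's store `multiplicands[j] = val` and the float local `last` (`d[R+38H]`);
and `lookup_values` is unchanged. One application of `C14.carry14`. -/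
theorem c14c_back {u₀ : State} {g : Ghost} {i : Nat} {A2 A3 Ai Am : Arena} {A : Arena × List Obj} {mults j : Nat}
    {v w : State}
    (h : In14L u₀ g i A2 A3 Ai Am A mults j v)
    (hjlt : j < Codebook.lookup_values v.mem (g.cb v.mem i))
    (hs : Mem.SameExcept [⟨g.R - 8, g.R⟩,
      ⟨Codebook.multiplicands v.mem (g.cb v.mem i) + 4 * j, Codebook.multiplicands v.mem (g.cb v.mem i) + 4 * j + 4⟩,
      ⟨g.R + 56, g.R + 60⟩] v.mem w.mem)
    (hun : ShadowUntouched v.mem w.mem)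
    (hrip : w.rip = L.start_decoder.loop14) (hrsp : w.reg .rsp = v.reg .rsp) (hcode : CodeOK u₀ w.mem) (hinv : abiInv w)
    (hr14 : w.reg .r14 = v.reg .r14) (hr12 : w.reg .r12 = Word.ofBV (BitVec.ofNat 32 j + 1#32)) :
    At14L u₀ g i (j + 1) w ∧ j < Codebook.lookup_values v.mem (g.cb v.mem i) ∧
      Codebook.lookup_values w.mem (g.cb w.mem i) = Codebook.lookup_values v.mem (g.cb v.mem i) := by
  have hlv2 := h.mults.lv_lt
  have e12 : w.reg .r12 = addr (j + 1) := by
    rw [hr12, cnt32_succ_bv, cnt32_ofBV (j + 1) (by omega)]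
    rfl
  have hq : ∀ x, x ∈ [(⟨g.R - 8, g.R⟩ : Span),
      ⟨Codebook.multiplicands v.mem (g.cb v.mem i) + 4 * j, Codebook.multiplicands v.mem (g.cb v.mem i) + 4 * j + 4⟩,
      ⟨g.R + 56, g.R + 60⟩] → C14.QuietWin14 g x ∨
      (Codebook.multiplicands v.mem (g.cb v.mem i) ≤ x.lo ∧
        x.hi ≤ Codebook.multiplicands v.mem (g.cb v.mem i) + 4 * Codebook.lookup_values v.mem (g.cb v.mem i)) := by
    intro x hx
    simp only [List.mem_cons, List.mem_nil_iff, or_false] at hx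
    unfold C14.QuietWin14
    rcases hx with rfl | rfl | rfl
    · left
      left
      simp only []
      omega
    · right
      simp only []
      omega
    · left
      right
      simp only []
      omega
  obtain ⟨hL, _, hlv⟩ := C14.carry14 (j' := j + 1) h hs hun hq hrip hrsp hcode hinv hr14 e12 (by omega)
  exact ⟨⟨A, mults, A2, A3, Ai, Am, hL⟩, hjlt, hlv⟩

/-- **Segment C14c: ONE ROUND of loop 3937** `for (j=0; j < (int) c->lookup_values; ++j)` (0x115129 … 0x1151ba, back edge 0x115121 …
0x115125). The walk is cut at the return of each of the six check calls (`clear w_zmm` there: the SSE steps after a check call would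
double the vector-register term). The only stores are the return addresses of the check calls (`[R − 8, R)`), the round's checked
store `multiplicands[j] = val` and the float local `last` (`d[R+38H]`): the exits are `c14c_exit15` (`LV ≤ j`) and `c14c_back`
(`j + 1`), both over `C14.carry14`. -/
theorem c14c_walk : Vorbis.Spec.start_decoder_C14c.Statement := by
  intro Lay hLay μ hμ u₀ hcode h_load4 h_load2 h_store4 h_load1
  intro g i j v hat
  obtain ⟨A, mults, A2, A3, Ai, Am, h⟩ := hat
  -- the entry state's facts and the present state's, under the names the walker reads
  have hfr := h.frame
  have he := hfr.entry
  v_entry he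
  have w_rip := hfr.rip
  have w_eq : Mem.EqOn Vorbis.L.textLo Vorbis.L.textHi u₀.mem v.mem := hfr.code
  have hdf : v.flags .df = false := (show abiInv _ from hfr.inv).1
  have hmx : v.mxcsr &&& 0x1F80 = 0x1F80 := (show abiInv _ from hfr.inv).2
  have hsse := Vorbis.sseOK_of_abiInv hfr.inv
  -- where things are: the stack, the struct `cb(i)`, the arena
  have hpos : Pos g A := Pos.of hfr h.cur
  have hm0 : MInv g i A2 A3 Ai A v.mem := MInv.of hfr h.cur
  have ha : ArenaOK A.1 A.2 v.mem g.f := h.cur.sd.arena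
  have hcw := hm0.c_where
  have p1 := hpos.r_eq
  have p2 := hpos.ra_lo
  have p3 := hpos.ra_hi
  have hsp : (v.reg .rsp).toNat = g.R := by
    rw [hfr.rsp]
    exact toNat_addr _ (by omega)
  -- the registers and the loads of the round, named before the walk: r14 = c, r12 = j, q[R+28H] = mults, LV, MU
  have c_r14 := h.cur.r14
  have c_r12 : v.reg .r12 = UInt64.ofNat j := h.r12
  have hslotm : v.mem.readLE (v.reg .rsp + 40) 8 = mults := by
    have := h.mults.slot
    rw [hfr.rsp]
    simp only [vfield]
    exact this
  have hLV : v.mem.readLE (addr (g.cb v.mem i) + 28) 4 = Codebook.lookup_values v.mem (g.cb v.mem i) := by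
    simp only [vacc, voff, Mem.u32, addr_add_lit]
  have hMU : v.mem.readLE (addr (g.cb v.mem i) + 32) 8 = Codebook.multiplicands v.mem (g.cb v.mem i) := by
    simp only [vacc, voff, Mem.u64, addr_add_lit]
  have hlv1 := h.mults.lv_pos
  have hlv2 := h.mults.lv_lt
  have hjle := h.j_le
  have e : L.textHi = 0x119d40 := rfl
  have ecb : (addr (g.cb v.mem i)).toNat = g.cb v.mem i := toNat_addr _ (by omega)
  -- the check sites of the struct's fields
  have hsiteLV := c14c_site h.cur 28 4 (by decide) (by decide)
  have hsiteDV := c14c_site h.cur 20 4 (by decide) (by decide)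
  have hsiteMN := c14c_site h.cur 16 4 (by decide) (by decide)
  have hsiteSQ := c14c_site h.cur 26 1 (by decide) (by decide)
  -- the `mults` temp block (2·LV bytes) and the `multiplicands` block (4·LV bytes, young: off the struct)
  have hsub : ∀ o, o ∈ A.2 → o ∈ stackObjs g.frames' ++ A.2 := fun o ho => List.mem_append_right _ ho
  have htb : A.1.TBlock mults (2 * Codebook.lookup_values v.mem (g.cb v.mem i)) :=
    h.mults.temps.tblock (List.mem_singleton.mpr rfl)
  have hmoffT := ha.tblock_off htb
  have hmub : A.1.Block (Codebook.multiplicands v.mem (g.cb v.mem i))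
      (4 * Codebook.lookup_values v.mem (g.cb v.mem i)) := h.mu.1
  have hmuY : Since Ai A.1 ⟨Codebook.multiplicands v.mem (g.cb v.mem i),
      4 * Codebook.lookup_values v.mem (g.cb v.mem i)⟩ := h.mu.older h.extm
  obtain ⟨hmuin, hmuoff⟩ := young_off_book hm0 hmuY
  simp only [] at hmuin hmuoff
  have p4 := hpos.ar_stack
  have p5 := hpos.ar_lo
  have p6 := hpos.ar_hi
  -- 0x115129 → 0x115132 (line 3937 `j < (int) c->lookup_values`): `lea rdi,[r14+1CH]`, the check of `c->lookup_values`
  u_walk hcode [hμ.vendor, cnt32_sext j (by omega), cnt32_sext_bv j (by omega), cnt32_part j, c14c_shl2 j (by omega)] until [Vorbis.L.start_decoder.ret282] span [Vorbis.L.textLo, Vorbis.L.textHi] side (first | v_side | (simp only [addr]; v_side))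
  case check_11512d =>
    have hun : ShadowUntouched v.mem s_11512d.mem := by v_untouched
    exact Vorbis.Spec.check_site hfr.shadow hun hsiteLV (by u_omega)
  try clear w_zmm
  -- 0x115132 → 0x114dfa (`jle`: the loop is left) | 0x115154 (line 3938): `&mults[j]` = `mults + 2j`, the check of `mults[j]`
  u_walk hcode [hμ.vendor, cnt32_sext j (by omega), cnt32_sext_bv j (by omega), cnt32_part j, c14c_shl2 j (by omega)] until [Vorbis.L.start_decoder.ret283, Vorbis.L.start_decoder.cut166] span [Vorbis.L.textLo, Vorbis.L.textHi] side (first | v_side | (simp only [addr]; v_side))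
  case check_11514f =>
    rw [cnt32_toInt _ (by omega), cnt32_toInt _ (by omega)] at hbr_115136
    have hjlt : j < Codebook.lookup_values v.mem (g.cb v.mem i) := by omega
    have hsiteM : Site (Live (stackObjs g.frames' ++ A.2)) (mults + 2 * j) 2 :=
      ha.site_tblock hsub htb (by omega) (by omega) (by decide)
    have hun : ShadowUntouched v.mem s_11514f.mem := by v_untouched
    exact Vorbis.Spec.check_site hfr.shadow hun hsiteM (by u_omega)
  · -- 0x114dfa: `LV ≤ j`, the loop is left
    have hun : ShadowUntouched v.mem s_115136.mem := by v_untouched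
    have hinv : (conv u₀).inv s_115136 := by v_inv
    have hs : Mem.SameExcept [⟨(v.reg .rsp).toNat - 8, (v.reg .rsp).toNat⟩] v.mem s_115136.mem := by u_same
    rw [hsp] at hs
    have hq : ∀ x, x ∈ [(⟨g.R - 8, g.R⟩ : Span)] → C14.QuietWin14 g x := by
      intro x hx
      rw [List.mem_singleton.mp hx]
      unfold C14.QuietWin14
      left
      simp only []
      omega
    have h15 := c14c_exit15 h hs hun hq w_rip w_rsp w_eq hinv (w_kept.get .r14 rfl) (w_kept.get .r12 rfl)
    exact ReachVia.done (Or.inr h15)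
  -- the `jle` was not taken: `j < LV`; the site of `multiplicands[j]`
  rw [cnt32_toInt _ (by omega), cnt32_toInt _ (by omega)] at hbr_115136
  have hjlt : j < Codebook.lookup_values v.mem (g.cb v.mem i) := by omega
  have eMUj : (UInt64.ofNat (4 * j) + UInt64.ofNat (Codebook.multiplicands v.mem (g.cb v.mem i))).toNat =
      Codebook.multiplicands v.mem (g.cb v.mem i) + 4 * j := by
    rw [UInt64.toNat_add, UInt64.toNat_ofNat', UInt64.toNat_ofNat']
    omega
  have hsiteMU : Site (Live (stackObjs g.frames' ++ A.2)) (Codebook.multiplicands v.mem (g.cb v.mem i) + 4 * j) 4 :=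
    ha.site_block hsub hmub (by omega) (by omega) (by decide)
  have hwhMU := Vorbis.Spec.site_where hfr.shadow hfr.offText (by omega) hsiteMU
  try clear w_zmm
  -- 0x115154 → 0x115160 (line 3938): `ebx = mults[j]`, the check of `c->delta_value`
  u_walk hcode [hμ.vendor, cnt32_sext j (by omega), cnt32_sext_bv j (by omega), cnt32_part j, c14c_shl2 j (by omega)] until [Vorbis.L.start_decoder.ret284] span [Vorbis.L.textLo, Vorbis.L.textHi] side (first | v_side | (simp only [addr]; v_side))
  case check_11515b =>
    have hun : ShadowUntouched v.mem s_11515b.mem := by v_untouched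
    exact Vorbis.Spec.check_site hfr.shadow hun hsiteDV (by u_omega)
  try clear w_zmm
  -- 0x115160 → 0x11517b (line 3938): `mults[j] * c->delta_value` (SSE, opaque), the check of `c->minimum_value`
  u_walk hcode [hμ.vendor, cnt32_sext j (by omega), cnt32_sext_bv j (by omega), cnt32_part j, c14c_shl2 j (by omega)] until [Vorbis.L.start_decoder.ret285] span [Vorbis.L.textLo, Vorbis.L.textHi] side (first | v_side | (simp only [addr]; v_side))
  case check_115176 =>
    have hun : ShadowUntouched v.mem s_115176.mem := by v_untouched
    exact Vorbis.Spec.check_site hfr.shadow hun hsiteMN (by u_omega)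
  try clear w_zmm
  -- 0x11517b → 0x11519f (lines 3938, 3939): `+ c->minimum_value + last`, `&c->multiplicands[j]` = `MU + 4j`, the check of the store
  u_walk hcode [hμ.vendor, cnt32_sext j (by omega), cnt32_sext_bv j (by omega), cnt32_part j, c14c_shl2 j (by omega)] until [Vorbis.L.start_decoder.ret286] span [Vorbis.L.textLo, Vorbis.L.textHi] side (first | v_side | (simp only [addr]; v_side))
  case check_11519a =>
    have hun : ShadowUntouched v.mem s_11519a.mem := by v_untouched
    exact Vorbis.Spec.check_site hfr.shadow hun hsiteMU (by u_omega)
  try clear w_zmm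
  -- 0x11519f → 0x1151ab (lines 3939, 3940): the store `c->multiplicands[j] = val`, the check of `c->sequence_p`
  u_walk hcode [hμ.vendor, cnt32_sext j (by omega), cnt32_sext_bv j (by omega), cnt32_part j, c14c_shl2 j (by omega)] until [Vorbis.L.start_decoder.ret287] span [Vorbis.L.textLo, Vorbis.L.textHi] side (first | v_side | (simp only [addr]; v_side))
  case side_code =>
    -- the store `multiplicands[j] = val` misses the text
    right
    rw [eMUj]
    omega
  case check_1151a6 =>
    have hun : ShadowUntouched v.mem s_1151a6.mem := by v_untouched
    exact Vorbis.Spec.check_site hfr.shadow hun hsiteSQ (by u_omega)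
  try clear w_zmm
  -- 0x1151ab → 0x115129 (line 3940 `if (c->sequence_p) last = val`, line 3937 `++j`): both arms, `mov [rsp+38H],ebx`, the loop head
  u_walk hcode [hμ.vendor, cnt32_sext j (by omega), cnt32_sext_bv j (by omega), cnt32_part j, c14c_shl2 j (by omega)] until [Vorbis.L.start_decoder.loop14] span [Vorbis.L.textLo, Vorbis.L.textHi] side (first | v_side | (simp only [addr]; v_side))
  · -- `sequence_p ≠ 0`: `last = val`: the back edge
    have hun : ShadowUntouched v.mem s_115125.mem := by v_untouched
    have hinv : (conv u₀).inv s_115125 := by v_inv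
    have hs : Mem.SameExcept [⟨(v.reg .rsp).toNat - 8, (v.reg .rsp).toNat⟩,
        ⟨Codebook.multiplicands v.mem (g.cb v.mem i) + 4 * j, Codebook.multiplicands v.mem (g.cb v.mem i) + 4 * j + 4⟩,
        ⟨(v.reg .rsp).toNat + 56, (v.reg .rsp).toNat + 60⟩] v.mem s_115125.mem := by u_same
    rw [hsp] at hs
    have hback := c14c_back h hjlt hs hun w_rip w_rsp w_eq hinv (w_kept.get .r14 rfl) w_r12
    exact ReachVia.done (Or.inl hback)
  · -- `sequence_p = 0`: `last` reloaded: the back edge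
    have hun : ShadowUntouched v.mem s_115125.mem := by v_untouched
    have hinv : (conv u₀).inv s_115125 := by v_inv
    have hs : Mem.SameExcept [⟨(v.reg .rsp).toNat - 8, (v.reg .rsp).toNat⟩,
        ⟨Codebook.multiplicands v.mem (g.cb v.mem i) + 4 * j, Codebook.multiplicands v.mem (g.cb v.mem i) + 4 * j + 4⟩,
        ⟨(v.reg .rsp).toNat + 56, (v.reg .rsp).toNat + 60⟩] v.mem s_115125.mem := by u_same
    rw [hsp] at hs
    have hback := c14c_back h hjlt hs hun w_rip w_rsp w_eq hinv (w_kept.get .r14 rfl) w_r12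
    exact ReachVia.done (Or.inl hback)


end Vorbis.Spec.start_decoder_C14c

theorem Vorbis.Spec.Worked.start_decoder_C14c_ok : Vorbis.Spec.start_decoder_C14c.Statement := Vorbis.Spec.start_decoder_C14c.c14c_walk
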